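-- pv_equiv track=rewrite | github.com/jm-morani/compet | google-code-jam/2022/round-1b/ex1/solve.py | resoudre
-- ===== SOURCE A (Python) =====
-- def resoudre(D):
--     paiement = 0
--     précédent = -1
--
--     début, fin = 0, len(D) - 1
--     while début <= fin:
--         if D[début] < D[fin]:
--             pancake = D[début]
--             début += 1
--         else:
--             pancake = D[fin]
--             fin -= 1
--         if pancake >= précédent:
--             paiement += 1
--             précédent = max(précédent, pancake)
--
--     return paiement
-- ===== SOURCE B (Python) =====
-- def resoudre(D):
--     # Phase 1: determine the exact serving order by consuming a working
--     # list from both ends (pop the smaller end, ties from the right).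
--     reste = list(D)
--     ordre = []
--     while reste:
--         if reste[0] < reste[-1]:
--             ordre.append(reste.pop(0))
--         else:
--             ordre.append(reste.pop())
--     # Phase 2: count the customers who pay (running maximum scan).
--     paiement = 0
--     meilleur = -1
--     for p in ordre:
--         if p >= meilleur:
--             paiement += 1
--             meilleur = p
--     return paiement
-- ===== Notes on version B (the rewrite author's own statement) =====
-- stated objective: alternative
-- what changed: B splits A's fused two-pointer loop into two passes with different data handling: first it materialises the serving order by popping the smaller end off a working copy of the list, then a separate running-maximum scan over that order counts the paying customers (and stores the served value directly instead of taking a max).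
import Mathlib
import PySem

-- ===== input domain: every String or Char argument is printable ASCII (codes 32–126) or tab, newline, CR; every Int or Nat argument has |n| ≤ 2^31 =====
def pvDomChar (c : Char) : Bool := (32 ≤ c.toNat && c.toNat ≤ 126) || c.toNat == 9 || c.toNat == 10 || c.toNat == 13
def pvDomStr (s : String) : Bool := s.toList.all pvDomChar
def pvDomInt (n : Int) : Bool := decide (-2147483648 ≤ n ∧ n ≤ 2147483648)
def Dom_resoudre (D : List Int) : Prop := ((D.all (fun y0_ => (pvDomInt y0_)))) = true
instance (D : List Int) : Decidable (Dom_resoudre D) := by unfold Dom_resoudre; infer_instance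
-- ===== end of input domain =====

-- B re-implements A in two passes: first materialise the serving order by popping the
-- smaller end of a working list, then count payers with a separate running-maximum scan
-- (objective: alternative decomposition; same results, no speed claim).

-- ===== PORT A =====
-- A's while loop with the two index pointers; the indexing D[début]/D[fin] is always
-- in range when taken (début ≤ fin lie inside the list), so .getD 0 is never the
-- default; exact transliteration of A's body.
def resoudreLoop (D : List Int) (deb fin paiement prec : Int) : Int :=
  if _h : deb ≤ fin then
    if (PySem.List.pyGet? D deb).getD 0 < (PySem.List.pyGet? D fin).getD 0 then
      let pancake := (PySem.List.pyGet? D deb).getD 0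
      if pancake ≥ prec then resoudreLoop D (deb + 1) fin (paiement + 1) (max prec pancake)
      else resoudreLoop D (deb + 1) fin paiement prec
    else
      let pancake := (PySem.List.pyGet? D fin).getD 0
      if pancake ≥ prec then resoudreLoop D deb (fin - 1) (paiement + 1) (max prec pancake)
      else resoudreLoop D deb (fin - 1) paiement prec
  else paiement
termination_by (fin + 1 - deb).toNat
decreasing_by all_goals omega

def resoudre (D : List Int) : Int :=
  resoudreLoop D 0 ((D.length : Int) - 1) 0 (-1)

-- ===== PORT B =====
-- phase 1 of Source B: pop the smaller end of the working list until it is empty,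
-- collecting the popped values in order.
def serveB (reste : List Int) : List Int :=
  match reste with
  | [] => []
  | x :: xs =>
    let dernier := (x :: xs).getLast (List.cons_ne_nil x xs)
    if x < dernier then x :: serveB xs
    else dernier :: serveB (x :: xs).dropLast
termination_by reste.length
decreasing_by all_goals simp [List.length_dropLast]

-- phase 2 of Source B: running-maximum scan counting the payers.
def resoudre_alt (D : List Int) : Int :=
  (serveB D).foldl
    (fun (s : Int × Int) p => if p ≥ s.2 then (s.1 + 1, p) else s) (0, -1) |>.1

-- ===== PRECONDITION & SPEC =====
def Spec_resoudre (D : List Int) (out : Int) : Prop := out = resoudre_alt D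
instance (D : List Int) (out : Int) : Decidable (Spec_resoudre D out) := by unfold Spec_resoudre; infer_instance

-- ===== CLAIM (what is proved, stated in full; the proofs are below) =====
def Claim_equal_resoudre : Prop := ∀ (D : List Int), Dom_resoudre D → Spec_resoudre D (resoudre D)

-- ===== LEMMAS AND PROOFS =====

-- explicit-accumulator form of B's counting fold
def countAux : List Int → Int → Int → Int
  | [], p, _ => p
  | x :: xs, p, m => if x ≥ m then countAux xs (p + 1) x else countAux xs p m

theorem countAux_foldl (l : List Int) (p m : Int) :
    (l.foldl (fun (s : Int × Int) q => if q ≥ s.2 then (s.1 + 1, q) else s) (p, m)).1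
      = countAux l p m := by
  induction l generalizing p m with
  | nil => rfl
  | cons x xs ih =>
    simp only [List.foldl, countAux]
    by_cases h : x ≥ m
    · rw [if_pos h, if_pos h, ih]
    · rw [if_neg h, if_neg h, ih]

theorem loop_eq (n : Nat) : ∀ (D : List Int) (deb fin p m : Int),
    0 ≤ deb → fin < (D.length : Int) → n = (fin + 1 - deb).toNat →
    resoudreLoop D deb fin p m = countAux (serveB ((D.drop deb.toNat).take n)) p m := by
  induction n with
  | zero =>
    intro D deb fin p m hdeb hfin hn
    rw [resoudreLoop]
    rw [dif_neg (by omega)]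
    simp [serveB, countAux]
  | succ n ih =>
    intro D deb fin p m hdeb hfin hn
    have hle : deb ≤ fin := by omega
    set a := deb.toNat with ha
    set b := fin.toNat with hb
    have hdeba : deb = (a : Int) := by omega
    have hfinb : fin = (b : Int) := by omega
    have hab : b = a + n := by omega
    have hblen : b < D.length := by omega
    have halen : a < D.length := by omega
    -- the segment is D[a] :: take n (drop (a+1) D)
    have hdropa : D.drop a = D[a] :: D.drop (a + 1) := List.drop_eq_getElem_cons halen
    have hseg : (D.drop a).take (n + 1) = D[a] :: (D.drop (a + 1)).take n := by
      rw [hdropa]; rfl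
    have hseglen : ((D.drop a).take (n + 1)).length = n + 1 := by
      simp; omega
    have hlast : ((D.drop a).take (n + 1)).getLast (by rw [hseg]; exact List.cons_ne_nil _ _)
        = D[b] := by
      rw [List.getLast_eq_getElem]
      have : ((D.drop a).take (n + 1))[((D.drop a).take (n + 1)).length - 1]'(by omega)
          = D[a + n]'(by omega) := by
        simp [hseglen, List.getElem_take, List.getElem_drop]
      rw [this]
      congr 1
      omega
    have hgd : (PySem.List.pyGet? D deb).getD 0 = D[a] := by
      rw [hdeba, PySem.List.pyGet?_natCast, List.getElem?_eq_getElem halen]; rfl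
    have hgf : (PySem.List.pyGet? D fin).getD 0 = D[b] := by
      rw [hfinb, PySem.List.pyGet?_natCast, List.getElem?_eq_getElem hblen]; rfl
    have hlastc : (D[a] :: (D.drop (a + 1)).take n).getLast
        (List.cons_ne_nil _ _) = D[b] := by
      have h1 : ((D.drop a).take (n + 1)).getLast? = some D[b] := by
        rw [List.getLast?_eq_getLast (by rw [hseg]; exact List.cons_ne_nil _ _), hlast]
      rw [hseg] at h1
      have h2 := List.getLast?_eq_getLast
        (List.cons_ne_nil D[a] ((D.drop (a + 1)).take n))
      rw [h1] at h2
      exact (Option.some.inj h2).symm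
    have hdlc : (D[a] :: (D.drop (a + 1)).take n).dropLast = (D.drop a).take n := by
      rw [← hseg, List.dropLast_eq_take, hseglen]
      simp [List.take_take]
    rw [resoudreLoop, dif_pos hle, hgd, hgf]
    by_cases hcmp : D[a] < D[b]
    · -- serve from the front
      have hserve : serveB ((D.drop a).take (n + 1))
          = D[a] :: serveB ((D.drop (a + 1)).take n) := by
        rw [hseg, serveB]
        simp only [hlastc]
        rw [if_pos hcmp]
      have hrec : ∀ p' m', resoudreLoop D (deb + 1) fin p' m'
          = countAux (serveB ((D.drop (a + 1)).take n)) p' m' := by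
        intro p' m'
        have := ih D (deb + 1) fin p' m' (by omega) hfin (by omega)
        rwa [show (deb + 1).toNat = a + 1 by omega] at this
      rw [if_pos hcmp, hserve]
      by_cases hpay : D[a] ≥ m
      · rw [if_pos hpay]
        simp only [countAux, if_pos hpay]
        rw [hrec, max_eq_right (by omega)]
      · rw [if_neg hpay]
        simp only [countAux, if_neg hpay]
        exact hrec p m
    · -- serve from the back
      have hserve : serveB ((D.drop a).take (n + 1))
          = D[b] :: serveB ((D.drop a).take n) := by
        rw [hseg, serveB]
        simp only [hlastc, hdlc]
        rw [if_neg (by omega)]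
      have hrec : ∀ p' m', resoudreLoop D deb (fin - 1) p' m'
          = countAux (serveB ((D.drop a).take n)) p' m' := by
        intro p' m'
        exact ih D deb (fin - 1) p' m' hdeb (by omega) (by omega)
      rw [if_neg hcmp, hserve]
      by_cases hpay : D[b] ≥ m
      · rw [if_pos hpay]
        simp only [countAux, if_pos hpay]
        rw [hrec, max_eq_right (by omega)]
      · rw [if_neg hpay]
        simp only [countAux, if_neg hpay]
        exact hrec p m

-- ===== VERDICT (by name: the statement is the Claim_ definition above) =====
theorem resoudre_spec : Claim_equal_resoudre := by
  intro D _
  unfold Spec_resoudre resoudre resoudre_alt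
  rw [countAux_foldl]
  have := loop_eq D.length D 0 ((D.length : Int) - 1) 0 (-1) (by omega) (by omega) (by omega)
  simpa using this
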